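-- pv_equiv track=rewrite | github.com/NCC-sdklab/scVarID | optional/scVarID_window_padding_chunk_parallel_indel_improved.py | handle_insertion
-- ===== SOURCE A (Python) =====
-- def handle_insertion(seqs, poss, ops, p_, ref_, alt_, rname, bc_):
--     """
--     Insertion logic: alt longer than ref => check inserted bases in the read
--     If consistent => 'alt', otherwise => 'unknown'
--     If read base is '-' => 'missing'
--     """
--     insertion_len= len(alt_)- len(ref_)
--     if insertion_len<=0:
--         return 'unknown', bc_, p_, rname
--
--     try:
--         pos_index= poss.index(p_)
--     except ValueError:
--         return 'unknown', bc_, p_, rname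
--
--     if seqs[pos_index]=='-':
--         return 'missing', bc_, p_, rname
--
--     ref_len= len(ref_)
--     alt_len= len(alt_)
--
--     # check if read's base for the "ref" portion matches
--     # e.g. if ref="A", alt="ACG" => insertion_len=2 => "CG"
--     # 1) check read[pos_index + i] matches ref[i], ops in "M=X"
--     for i in range(ref_len):
--         ridx= pos_index+ i
--         if ridx>= len(seqs):
--             return 'unknown', bc_, p_, rname
--         if ops[ridx] not in "M=X":
--             return 'unknown', bc_, p_, rname
--         if seqs[ridx]!= ref_[i]:
--             return 'unknown', bc_, p_, rname
--
--     # 2) insertion portion => alt_[ref_len:]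
--     insertion_part= alt_[ref_len:]  # e.g. "CG"
--     for i, base_ in enumerate(insertion_part):
--         ridx= pos_index+ ref_len + i
--         if ridx>= len(seqs):
--             return 'unknown', bc_, p_, rname
--         # expect ops[ridx]=='I'
--         if ops[ridx]!= 'I':
--             return 'unknown', bc_, p_, rname
--         if seqs[ridx]!= base_:
--             return 'unknown', bc_, p_, rname
--
--     return 'alt', bc_, p_, rname
-- ===== SOURCE B (Python) =====
-- def _consume(tokens, pairs):
--     # consume the precomputed token pattern against (read base, op) pairs, head by head
--     while tokens:
--         if not pairs:
--             return False
--         is_ins, base = tokens[0]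
--         s, o = pairs[0]
--         if not ((o == 'I' if is_ins else o in "M=X") and s == base):
--             return False
--         tokens, pairs = tokens[1:], pairs[1:]
--     return True
--
--
-- def handle_insertion(seqs, poss, ops, p_, ref_, alt_, rname, bc_):
--     if len(alt_) <= len(ref_):
--         return 'unknown', bc_, p_, rname
--     try:
--         idx = poss.index(p_)
--     except ValueError:
--         return 'unknown', bc_, p_, rname
--     if seqs[idx] == '-':
--         return 'missing', bc_, p_, rname
--     # one fused pass: build the expected pattern once -- (False, c) means "match c under
--     # an M/=/X op", (True, c) means "inserted base c under an I op" -- then consume it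
--     # against the zipped (read, ops) tail; running out of pairs means 'unknown'.
--     n = len(alt_)
--     tokens = [(False, c) for c in ref_] + [(True, c) for c in alt_[len(ref_):]]
--     pairs = list(zip(seqs[idx:idx + n], ops[idx:idx + n]))
--     ok = _consume(tokens, pairs)
--     return ('alt' if ok else 'unknown'), bc_, p_, rname
-- ===== Notes on version B (the rewrite author's own statement) =====
-- stated objective: alternative
-- what changed: A's two interleaved index-arithmetic loops (bound/op/base per position) are replaced by compiling the variant once into an expected token pattern [(ref-match, c)...]+[(insert, c)...] and consuming that pattern head-by-head against the zipped (read base, op) tail in a single fused pass with no index arithmetic.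
import Mathlib
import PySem

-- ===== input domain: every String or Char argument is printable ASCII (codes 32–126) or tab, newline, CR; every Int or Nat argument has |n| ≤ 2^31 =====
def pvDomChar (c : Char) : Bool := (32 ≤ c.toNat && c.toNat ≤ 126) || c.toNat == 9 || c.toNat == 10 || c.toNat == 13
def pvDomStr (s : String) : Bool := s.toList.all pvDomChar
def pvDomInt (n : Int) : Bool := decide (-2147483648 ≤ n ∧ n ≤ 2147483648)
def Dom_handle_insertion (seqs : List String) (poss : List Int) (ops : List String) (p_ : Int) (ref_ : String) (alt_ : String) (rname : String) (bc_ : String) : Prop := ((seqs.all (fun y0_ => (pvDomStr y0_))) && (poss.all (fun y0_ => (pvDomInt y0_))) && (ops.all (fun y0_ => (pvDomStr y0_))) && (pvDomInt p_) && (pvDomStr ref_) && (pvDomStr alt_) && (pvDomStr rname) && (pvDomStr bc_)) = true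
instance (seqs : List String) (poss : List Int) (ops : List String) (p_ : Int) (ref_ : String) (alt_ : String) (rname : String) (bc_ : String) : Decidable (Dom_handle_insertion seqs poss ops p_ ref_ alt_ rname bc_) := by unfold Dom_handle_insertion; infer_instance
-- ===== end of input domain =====

-- B compiles the variant once into an expected token pattern ((ref-match, c) / (insert, c))
-- and consumes it head-by-head against the zipped (read base, op) tail in one fused pass
-- with no index arithmetic, instead of A's two interleaved index-arithmetic loops
-- (objective: alternative).

-- ===== PORT A =====
-- A's first loop: for i in range(ref_len): bound check, ops[ridx] in "M=X" (Python substring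
-- membership), seqs[ridx] == ref_[i]; ridx = pos_index + i is carried directly.
-- ops[ridx]/seqs[ridx] use getD "": Pre_ keeps every accessed index in range (IndexError otherwise).
def pvAScanRef (seqs ops : List String) : Nat → List Char → Bool
  | _, [] => true
  | ridx, c :: cs =>
    if seqs.length ≤ ridx then false
    else if !(PySem.Str.isIn (ops.getD ridx "") "M=X") then false
    else if (seqs.getD ridx "").toList ≠ [c] then false
    else pvAScanRef seqs ops (ridx + 1) cs

-- A's second loop over insertion_part: bound check, ops[ridx] == 'I', seqs[ridx] == base_
def pvAScanIns (seqs ops : List String) : Nat → List Char → Bool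
  | _, [] => true
  | ridx, c :: cs =>
    if seqs.length ≤ ridx then false
    else if (ops.getD ridx "").toList ≠ ['I'] then false
    else if (seqs.getD ridx "").toList ≠ [c] then false
    else pvAScanIns seqs ops (ridx + 1) cs

def handle_insertion (seqs : List String) (poss : List Int) (ops : List String) (p_ : Int) (ref_ : String) (alt_ : String) (rname : String) (bc_ : String) : String × String × Int × String :=
  let insertion_len : Int := PySem.Str.len alt_ - PySem.Str.len ref_
  if insertion_len ≤ 0 then ("unknown", bc_, p_, rname)
  else
    match PySem.List.index? poss p_ with
    | none => ("unknown", bc_, p_, rname)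
    | some pos_index =>
      if (seqs.getD pos_index "").toList = ['-'] then ("missing", bc_, p_, rname)
      else
        let ref_len := ref_.toList.length
        if !(pvAScanRef seqs ops pos_index ref_.toList) then ("unknown", bc_, p_, rname)
        else
          let insertion_part := alt_.toList.drop ref_len
          if !(pvAScanIns seqs ops (pos_index + ref_len) insertion_part) then ("unknown", bc_, p_, rname)
          else ("alt", bc_, p_, rname)

-- ===== PORT B =====
-- Source B's _consume: pop the head token and the head (read base, op) pair until the pattern
-- is exhausted (True) or a pair is missing / mismatching (False).
def pvBConsume : List (Bool × Char) → List (String × String) → Bool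
  | [], _ => true
  | _ :: _, [] => false
  | (is_ins, base) :: ts, (s, o) :: ps =>
    if ((if is_ins then decide (o.toList = ['I']) else PySem.Str.isIn o "M=X")
        && decide (s.toList = [base])) then pvBConsume ts ps else false

def handle_insertion_alt (seqs : List String) (poss : List Int) (ops : List String) (p_ : Int) (ref_ : String) (alt_ : String) (rname : String) (bc_ : String) : String × String × Int × String :=
  if alt_.toList.length ≤ ref_.toList.length then ("unknown", bc_, p_, rname)
  else
    match PySem.List.index? poss p_ with
    | none => ("unknown", bc_, p_, rname)
    | some idx =>
      if (seqs.getD idx "").toList = ['-'] then ("missing", bc_, p_, rname)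
      else
        let n := alt_.toList.length
        let tokens := ref_.toList.map (fun c => (false, c))
          ++ (alt_.toList.drop ref_.toList.length).map (fun c => (true, c))
        let pairs := ((seqs.drop idx).take n).zip ((ops.drop idx).take n)
        if pvBConsume tokens pairs then ("alt", bc_, p_, rname)
        else ("unknown", bc_, p_, rname)

-- ===== PRECONDITION & SPEC =====
-- Pre_ excludes inputs where, with a genuine insertion variant whose position is found in poss,
-- the matched index reaches outside seqs (A raises IndexError at seqs[pos_index]) or ops is
-- shorter than seqs (A can raise IndexError at ops[ridx] mid-scan); on some such inputs an
-- earlier guard still makes A return ('missing'/'unknown'), and B returns the same value there.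
def Pre_handle_insertion (seqs : List String) (poss : List Int) (ops : List String) (p_ : Int) (ref_ : String) (alt_ : String) (rname : String) (bc_ : String) : Prop :=
  (ref_.toList.length < alt_.toList.length ∧ p_ ∈ poss) →
    (poss.idxOf p_ < seqs.length ∧ seqs.length ≤ ops.length)
instance (seqs : List String) (poss : List Int) (ops : List String) (p_ : Int) (ref_ : String) (alt_ : String) (rname : String) (bc_ : String) : Decidable (Pre_handle_insertion seqs poss ops p_ ref_ alt_ rname bc_) := by unfold Pre_handle_insertion; infer_instance

def pvWitness_handle_insertion : List String × List Int × List String × Int × String × String × String × String :=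
  (["A", "C"], [5, 6], ["M", "I"], 5, "A", "AC", "r", "b")

def Spec_handle_insertion (seqs : List String) (poss : List Int) (ops : List String) (p_ : Int) (ref_ : String) (alt_ : String) (rname : String) (bc_ : String) (out : String × String × Int × String) : Prop := out = handle_insertion_alt seqs poss ops p_ ref_ alt_ rname bc_
instance (seqs : List String) (poss : List Int) (ops : List String) (p_ : Int) (ref_ : String) (alt_ : String) (rname : String) (bc_ : String) (out : String × String × Int × String) : Decidable (Spec_handle_insertion seqs poss ops p_ ref_ alt_ rname bc_ out) := by unfold Spec_handle_insertion; infer_instance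

-- ===== CLAIM (what is proved, stated in full; the proofs are below) =====
def Claim_equal_handle_insertion : Prop := ∀ (seqs : List String) (poss : List Int) (ops : List String) (p_ : Int) (ref_ : String) (alt_ : String) (rname : String) (bc_ : String), Dom_handle_insertion seqs poss ops p_ ref_ alt_ rname bc_ → Pre_handle_insertion seqs poss ops p_ ref_ alt_ rname bc_ → Spec_handle_insertion seqs poss ops p_ ref_ alt_ rname bc_ (handle_insertion seqs poss ops p_ ref_ alt_ rname bc_)

-- ===== LEMMAS AND PROOFS =====

-- consuming looks at no more than |tokens| pairs
lemma pvConsume_take : ∀ (ts : List (Bool × Char)) (ps : List (String × String)),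
    pvBConsume ts (ps.take ts.length) = pvBConsume ts ps := by
  intro ts
  induction ts with
  | nil => intro ps; rfl
  | cons t ts ih =>
    intro ps
    cases ps with
    | nil => simp [pvBConsume]
    | cons p ps =>
      obtain ⟨is_ins, base⟩ := t
      obtain ⟨s, o⟩ := p
      simp only [List.length_cons, List.take_succ_cons, pvBConsume]
      rw [ih]

-- consuming the insertion tokens = A's second loop
lemma pvConsume_ins (seqs ops : List String) (hops : seqs.length ≤ ops.length) :
    ∀ (cs : List Char) (idx : Nat),
      pvBConsume (cs.map (fun c => (true, c))) ((seqs.drop idx).zip (ops.drop idx))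
        = pvAScanIns seqs ops idx cs := by
  intro cs
  induction cs with
  | nil => intro idx; rfl
  | cons c cs ih =>
    intro idx
    by_cases h1 : seqs.length ≤ idx
    · have hz : seqs.drop idx = [] := List.drop_eq_nil_of_le h1
      simp [pvBConsume, pvAScanIns, h1, hz]
    · have hlt : idx < seqs.length := by omega
      have hlt2 : idx < ops.length := by omega
      rw [List.drop_eq_getElem_cons hlt, List.drop_eq_getElem_cons hlt2]
      simp only [List.map_cons, List.zip_cons_cons, pvBConsume, pvAScanIns, h1, if_false,
        List.getD_eq_getElem _ _ hlt, List.getD_eq_getElem _ _ hlt2]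
      by_cases h2 : (ops[idx]).toList = ['I'] <;>
        by_cases h3 : (seqs[idx]).toList = [c] <;>
          simp [h2, h3, ih]

-- consuming the full token pattern = A's two loops chained
lemma pvConsume_eq (seqs ops : List String) (hops : seqs.length ≤ ops.length) :
    ∀ (rs cs : List Char) (idx : Nat),
      pvBConsume (rs.map (fun c => (false, c)) ++ cs.map (fun c => (true, c)))
          ((seqs.drop idx).zip (ops.drop idx))
        = (pvAScanRef seqs ops idx rs && pvAScanIns seqs ops (idx + rs.length) cs) := by
  intro rs
  induction rs with
  | nil => intro cs idx; simp [pvConsume_ins seqs ops hops cs idx, pvAScanRef]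
  | cons r rs ih =>
    intro cs idx
    by_cases h1 : seqs.length ≤ idx
    · have hz : seqs.drop idx = [] := List.drop_eq_nil_of_le h1
      simp [pvBConsume, pvAScanRef, h1, hz]
    · have hlt : idx < seqs.length := by omega
      have hlt2 : idx < ops.length := by omega
      rw [List.drop_eq_getElem_cons hlt, List.drop_eq_getElem_cons hlt2]
      simp only [List.map_cons, List.cons_append, List.zip_cons_cons, pvBConsume, pvAScanRef,
        h1, if_false, List.getD_eq_getElem _ _ hlt, List.getD_eq_getElem _ _ hlt2]
      have harith : idx + 1 + rs.length = idx + (rs.length + 1) := by omega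
      by_cases h2 : PySem.Str.isIn (ops[idx]) "M=X" = true <;>
        by_cases h3 : (seqs[idx]).toList = [r] <;>
          simp [h2, h3, ih, harith, Bool.and_assoc]

-- ===== VERDICT (by name: the statement is the Claim_ definition above) =====
theorem handle_insertion_spec : Claim_equal_handle_insertion := by
  intro seqs poss ops p_ ref_ alt_ rname bc_ _ hpre
  unfold Pre_handle_insertion at hpre
  unfold Spec_handle_insertion
  unfold handle_insertion handle_insertion_alt
  simp only [PySem.Str.len_eq]
  by_cases hins : alt_.toList.length ≤ ref_.toList.length
  · rw [if_pos (show ((alt_.toList.length : Int) - (ref_.toList.length : Int)) ≤ 0 by omega),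
      if_pos hins]
  · rw [if_neg (show ¬ ((alt_.toList.length : Int) - (ref_.toList.length : Int)) ≤ 0 by omega),
      if_neg hins]
    cases hidx : PySem.List.index? poss p_ with
    | none => rfl
    | some idx =>
      dsimp only
      have hmem : p_ ∈ poss := (PySem.List.index?_isSome_iff poss p_).mp (by rw [hidx]; rfl)
      have hidxOf : poss.idxOf p_ = idx := by
        have h := hidx
        rw [PySem.List.index?_eq_idxOf?] at h
        rw [List.idxOf_eq_getD_idxOf?, h]; rfl
      obtain ⟨hlt, hops⟩ := hpre ⟨by omega, hmem⟩
      rw [hidxOf] at hlt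
      by_cases hdash : (seqs.getD idx "").toList = ['-']
      · rw [if_pos hdash, if_pos hdash]
      · rw [if_neg hdash, if_neg hdash]
        have hzip : ((seqs.drop idx).take alt_.toList.length).zip
              ((ops.drop idx).take alt_.toList.length)
            = ((seqs.drop idx).zip (ops.drop idx)).take alt_.toList.length := by
          simp [List.zip, List.take_zipWith]
        have hlen : (ref_.toList.map (fun c => ((false : Bool), c))
            ++ (alt_.toList.drop ref_.toList.length).map (fun c => ((true : Bool), c))).length
            = alt_.toList.length := by
          simp only [List.length_append, List.length_map, List.length_drop]; omega
        have hcons : pvBConsume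
            (ref_.toList.map (fun c => ((false : Bool), c))
              ++ (alt_.toList.drop ref_.toList.length).map (fun c => ((true : Bool), c)))
            (((seqs.drop idx).take alt_.toList.length).zip
              ((ops.drop idx).take alt_.toList.length))
            = (pvAScanRef seqs ops idx ref_.toList
              && pvAScanIns seqs ops (idx + ref_.toList.length)
                  (alt_.toList.drop ref_.toList.length)) := by
          rw [hzip, ← hlen, pvConsume_take, pvConsume_eq seqs ops hops]
        by_cases hA : pvAScanRef seqs ops idx ref_.toList = true
        · by_cases hB : pvAScanIns seqs ops (idx + ref_.toList.length)
              (alt_.toList.drop ref_.toList.length) = true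
          · rw [if_neg (by rw [hA]; simp), if_neg (by rw [hB]; simp),
              if_pos (by rw [hcons, hA, hB]; rfl)]
          · rw [if_neg (by rw [hA]; simp),
              if_pos (by rw [Bool.eq_false_iff.mpr hB]; simp),
              if_neg (by rw [hcons, Bool.eq_false_iff.mpr hB]; simp)]
        · rw [if_pos (by rw [Bool.eq_false_iff.mpr hA]; simp),
            if_neg (by rw [hcons, Bool.eq_false_iff.mpr hA]; simp)]
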